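-- pv_equiv track=rewrite | github.com/sebbele/advent-of-code-2018 | 6-1.py | propagateGrid
-- ===== SOURCE A (Python) =====
-- def propagateGrid(grid, input_dict):
--     for y in range(len(grid)):
--         for x in range(len(grid[0])):
--             coords = [y, x]
--             if grid[y][x] != '.':
--                 continue
--             else:
--                 grid[y][x] = getManhattan(grid, coords, input_dict)
--                 continue
--     return grid
--
-- def getManhattan(grid, coords, candidates):
--     choices = {}
--     for candidate in candidates:
--         manhattan_distance = abs(candidates[candidate][1] - coords[1]) + abs(candidates[candidate][0] - coords[0])
--         choices[candidate] = manhattan_distance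
--     res = minimums(choices)
--     if len(res) == 1:
--         return res[0]
--     else:
--         return '.'
--
-- def minimums(some_dict):
--     positions = [] # output variable
--     min_value = float("inf")
--     for k, v in some_dict.items():
--         if v == min_value:
--             positions.append(k)
--         if v < min_value:
--             min_value = v
--             positions = [] # output variable
--             positions.append(k)
--     return positions
-- ===== SOURCE B (Python) =====
-- def propagateGrid(grid, input_dict):
--     # Candidate-major sweep: one (best-distance, label) pair per cell, updated once per
--     # candidate; ties collapse the label to '.'.  Early return when no '.' cell exists.
--     # Returns a new grid; A mutates its argument in place (return values agree).
--     h = len(grid)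
--     w = len(grid[0]) if grid else 0
--     if all('.' not in row[:w] for row in grid):
--         return grid
--     state = [[(None, '.')] * w for _ in range(h)]
--     for k, v in input_dict.items():
--         cy, cx = v[0], v[1]
--         for y in range(h):
--             row = state[y]
--             ay = abs(cy - y)
--             for x in range(w):
--                 d = ay + abs(cx - x)
--                 b = row[x][0]
--                 if b is None or d < b:
--                     row[x] = (d, k)
--                 elif d == b:
--                     row[x] = (b, '.')
--     return [[state[y][x][1] if cell == '.' and x < w else cell
--              for x, cell in enumerate(row)]
--             for y, row in enumerate(grid)]
-- ===== Notes on version B (the rewrite author's own statement) =====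
-- stated objective: alternative
-- what changed: A's cell-major scan (per '.' cell: build a dict of distances to every candidate, then scan it for a unique minimum) is replaced by a candidate-major sweep that keeps one (best-distance, label) pair per cell and collapses ties to '.', with an early return when the grid has no '.' cell; B returns a new grid while A mutates its argument in place (return values agree).
import Mathlib
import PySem

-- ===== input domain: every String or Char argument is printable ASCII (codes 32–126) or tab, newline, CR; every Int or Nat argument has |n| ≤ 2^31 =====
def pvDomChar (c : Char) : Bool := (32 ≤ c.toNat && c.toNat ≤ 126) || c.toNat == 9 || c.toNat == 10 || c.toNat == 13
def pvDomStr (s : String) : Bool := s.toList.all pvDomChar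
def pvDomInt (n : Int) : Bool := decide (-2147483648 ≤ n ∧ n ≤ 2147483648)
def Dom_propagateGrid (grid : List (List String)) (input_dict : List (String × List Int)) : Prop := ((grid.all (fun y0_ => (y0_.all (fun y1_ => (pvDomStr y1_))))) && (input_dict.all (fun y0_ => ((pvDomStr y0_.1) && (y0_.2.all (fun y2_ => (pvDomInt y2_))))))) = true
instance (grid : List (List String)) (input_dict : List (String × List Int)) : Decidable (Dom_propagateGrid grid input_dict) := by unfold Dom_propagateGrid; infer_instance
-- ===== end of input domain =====

-- B replaces A's cell-major scan (per cell: dict of distances, then a minimum scan) by a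
-- candidate-major sweep keeping one (best,label) pair per cell, with an early return when
-- no '.' cell exists.  Python A mutates `grid` in place; the equality proved is about the
-- RETURN value (B returns a new grid).

-- ===== PORT A =====
-- loop body of minimums(): append on equality, reset on a strictly smaller value
def pvAStep (st : List String × Option Int) (kv : String × Int) : List String × Option Int :=
  let positions := if (match st.2 with | some m => kv.2 == m | none => false) then st.1 ++ [kv.1] else st.1
  if (match st.2 with | some m => decide (kv.2 < m) | none => true) = true then ([kv.1], some kv.2)
  else (positions, st.2)

-- minimums(some_dict); min_value = float("inf") is modelled as `none`
def pvMinimums (some_dict : PySem.Dict String Int) : List String :=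
  (some_dict.items.foldl pvAStep ([], (none : Option Int))).1

-- getManhattan(grid, coords, candidates) (the `grid` argument is never read by the Python)
def pvGetManhattan (grid : List (List String)) (coords : List Int) (candidates : PySem.Dict String (List Int)) : String :=
  let choices := candidates.items.foldl
    (fun (ch : PySem.Dict String Int) kv =>
      ch.insert kv.1 (|PySem.List.pyGetD kv.2 1 0 - PySem.List.pyGetD coords 1 0| +
                      |PySem.List.pyGetD kv.2 0 0 - PySem.List.pyGetD coords 0 0|))
    PySem.Dict.empty
  let res := pvMinimums choices
  if res.length == 1 then PySem.List.pyGetD res 0 "" else "."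

-- body of the inner x-loop
def pvAInner (cands : PySem.Dict String (List Int)) (y : Nat) (g : List (List String)) (x : Nat) : List (List String) :=
  let coords : List Int := [(y : Int), (x : Int)]
  if (g.getD y []).getD x "" ≠ "." then g
  else g.set y ((g.getD y []).set x (pvGetManhattan g coords cands))

def propagateGrid (grid : List (List String)) (input_dict : List (String × List Int)) : List (List String) :=
  let cands := PySem.Dict.ofList input_dict
  (List.range grid.length).foldl
    (fun g y => (List.range (g.getD 0 []).length).foldl (pvAInner cands y) g) grid

-- ===== PORT B =====
-- body of B's inner x-loop: update the (best,label) pair of one cell for one candidate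
def pvBRow (k : String) (ay cx : Int) (row : List (Option Int × String)) (x : Nat) : List (Option Int × String) :=
  let d := ay + |cx - (x : Int)|
  match (row.getD x ((none : Option Int), ".")).1 with
  | none => row.set x (some d, k)
  | some b =>
      if d < b then row.set x (some d, k)
      else if d = b then row.set x (some b, ".") else row

def propagateGrid_alt (grid : List (List String)) (input_dict : List (String × List Int)) : List (List String) :=
  let h := grid.length
  let w := (grid.headD []).length
  if grid.all (fun row => !((row.take w).contains ".")) then grid
  else
    let state := (PySem.Dict.ofList input_dict).items.foldl
      (fun st kv =>
        let cy := PySem.List.pyGetD kv.2 0 0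
        let cx := PySem.List.pyGetD kv.2 1 0
        (List.range h).foldl
          (fun st y => st.set y ((List.range w).foldl (pvBRow kv.1 |cy - (y : Int)| cx) (st.getD y []))) st)
      (List.replicate h (List.replicate w ((none : Option Int), ".")))
    grid.mapIdx (fun y row => row.mapIdx (fun x cell =>
      if cell = "." ∧ x < w then ((state.getD y []).getD x (none, ".")).2 else cell))

-- ===== PRECONDITION & SPEC =====
-- Pre_ is exactly where Python A returns: every row must reach the width of row 0 (else the
-- read grid[y][x] raises IndexError), and, when some '.' cell lies within that width, every
-- candidate value (after dict collapsing) must have at least two coordinates (else v[0]/v[1]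
-- raises IndexError).
def Pre_propagateGrid (grid : List (List String)) (input_dict : List (String × List Int)) : Prop :=
  (∀ row ∈ grid, (grid.headD []).length ≤ row.length) ∧
  ((∃ row ∈ grid, "." ∈ row.take (grid.headD []).length) →
    ∀ kv ∈ (PySem.Dict.ofList input_dict).items, 2 ≤ kv.2.length)
instance (grid : List (List String)) (input_dict : List (String × List Int)) : Decidable (Pre_propagateGrid grid input_dict) := by unfold Pre_propagateGrid; infer_instance

def pvWitness_propagateGrid : List (List String) × (List (String × List Int)) :=
  ([[".", "A"], ["B", "."]], [("a", [0, 0]), ("b", [1, 1])])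

def Spec_propagateGrid (grid : List (List String)) (input_dict : List (String × List Int)) (out : List (List String)) : Prop := out = propagateGrid_alt grid input_dict
instance (grid : List (List String)) (input_dict : List (String × List Int)) (out : List (List String)) : Decidable (Spec_propagateGrid grid input_dict out) := by unfold Spec_propagateGrid; infer_instance

-- ===== CLAIM (what is proved, stated in full; the proofs are below) =====
def Claim_equal_propagateGrid : Prop := ∀ (grid : List (List String)) (input_dict : List (String × List Int)), Dom_propagateGrid grid input_dict → Pre_propagateGrid grid input_dict → Spec_propagateGrid grid input_dict (propagateGrid grid input_dict)

-- ===== LEMMAS AND PROOFS =====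

-- the per-cell streaming step B uses, as a named function (pvBRow writes exactly this value)
def pvStep (d : Int) (cell : Option Int × String) (k : String) : Option Int × String :=
  match cell.1 with
  | none => (some d, k)
  | some b => if d < b then (some d, k) else if d = b then (some b, ".") else cell

def pvDist (kv : String × List Int) (y x : Nat) : Int :=
  |PySem.List.pyGetD kv.2 0 0 - (y : Int)| + |PySem.List.pyGetD kv.2 1 0 - (x : Int)|

def pvCell (items : List (String × List Int)) (y x : Nat) : Option Int × String :=
  items.foldl (fun c kv => pvStep (pvDist kv y x) c kv.1) ((none : Option Int), ".")

-- the common normal form of both ports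
def pvN (grid : List (List String)) (items : List (String × List Int)) (w : Nat) : List (List String) :=
  grid.mapIdx (fun y row => row.mapIdx (fun x c =>
    if x < w then (if c = "." then (pvCell items y x).2 else c) else c))

def pvPosLab (pos : List String) : String := match pos with | [p] => p | _ => "."


-- out-of-range set is a no-op (name for List.set_eq_of_length_le in our argument order)
theorem pv_set_oob {α : Type} (l : List α) (i : Nat) (a : α) (h : l.length ≤ i) : l.set i a = l :=
  List.set_eq_of_length_le h

theorem pv_set_getD {α : Type} (g : List α) (y : Nat) (d : α) (hy : y < g.length) :
    g.set y (g.getD y d) = g := by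
  rw [List.getD_eq_getElem g d hy, List.set_getElem_self]

-- a left fold of writes over `range n` is a bounded mapIdx
theorem pvL {α : Type} (d : α) (f : Nat → α → α) (n : Nat) (r : List α) :
    (List.range n).foldl (fun r i => r.set i (f i (r.getD i d))) r
      = r.mapIdx (fun i c => if i < n then f i c else c) := by
  induction n with
  | zero =>
    apply List.ext_getElem <;> simp
  | succ n ih =>
    rw [List.range_succ, List.foldl_append, List.foldl_cons, List.foldl_nil, ih]
    apply List.ext_getElem
    · simp
    · intro i h1 h2
      have hi : i < r.length := by simpa using h1
      rw [List.getElem_set]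
      by_cases hni : n = i
      · subst hni
        rw [if_pos rfl, List.getD_eq_getElem _ d (by simpa using hi)]
        simp [List.getElem_mapIdx]
      · rw [if_neg hni, List.getElem_mapIdx, List.getElem_mapIdx]
        by_cases hin : i < n
        · simp [hin, Nat.lt_succ_of_lt hin]
        · have h5 : ¬ i < n + 1 := by omega
          simp [hin, h5]

-- a fold of pointwise (mapIdx) steps is a pointwise fold
theorem pvFoldlMapIdx {α β : Type} (f : β → Nat → α → α) (l : List β) (init : List α) :
    l.foldl (fun st a => st.mapIdx (fun i c => f a i c)) init
      = init.mapIdx (fun i c => l.foldl (fun c a => f a i c) c) := by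
  induction l generalizing init with
  | nil => apply List.ext_getElem <;> simp
  | cons a l ih =>
    rw [List.foldl_cons, ih]
    apply List.ext_getElem
    · simp
    · intro i h1 h2
      simp [List.getElem_mapIdx]

theorem pvPosLab_append (pos : List String) (k : String) (h : pos ≠ []) :
    pvPosLab (pos ++ [k]) = "." := by
  match pos with
  | [] => exact absurd rfl h
  | [p] => rfl
  | p :: q :: r => rfl

-- minimums' (positions, min) loop and B's (best, label) stream keep in lockstep
theorem pvMinStep (l : List (String × Int)) : ∀ (pos : List String) (mv : Option Int),
    (pos = [] ↔ mv = none) →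
    (l.foldl (fun c kv => pvStep kv.2 c kv.1) (mv, pvPosLab pos))
        = ((l.foldl pvAStep (pos, mv)).2, pvPosLab (l.foldl pvAStep (pos, mv)).1)
      ∧ ((l.foldl pvAStep (pos, mv)).1 = [] ↔ (l.foldl pvAStep (pos, mv)).2 = none) := by
  induction l with
  | nil =>
    intro pos mv h
    exact ⟨rfl, h⟩
  | cons kv l ih =>
    intro pos mv h
    rw [List.foldl_cons, List.foldl_cons]
    match mv with
    | none =>
      have hpos : pos = [] := h.mpr rfl
      subst hpos
      have hA : pvAStep ([], none) kv = ([kv.1], some kv.2) := by simp [pvAStep]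
      have hB : pvStep kv.2 (none, pvPosLab []) kv.1 = (some kv.2, pvPosLab [kv.1]) := by
        simp [pvStep, pvPosLab]
      rw [hA, hB]
      exact ih [kv.1] (some kv.2) (by simp)
    | some m =>
      have hpos : pos ≠ [] := by
        intro hh; simpa using h.mp hh
      by_cases hlt : kv.2 < m
      · have hA : pvAStep (pos, some m) kv = ([kv.1], some kv.2) := by
          simp [pvAStep, hlt]
        have hB : pvStep kv.2 (some m, pvPosLab pos) kv.1 = (some kv.2, pvPosLab [kv.1]) := by
          simp [pvStep, hlt, pvPosLab]
        rw [hA, hB]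
        exact ih [kv.1] (some kv.2) (by simp)
      · by_cases heq : kv.2 = m
        · have hA : pvAStep (pos, some m) kv = (pos ++ [kv.1], some m) := by
            simp [pvAStep, heq]
          have hB : pvStep kv.2 (some m, pvPosLab pos) kv.1
              = (some m, pvPosLab (pos ++ [kv.1])) := by
            simp [pvStep, heq, pvPosLab_append pos kv.1 hpos]
          rw [hA, hB]
          exact ih (pos ++ [kv.1]) (some m) (by simp)
        · have hA : pvAStep (pos, some m) kv = (pos, some m) := by
            simp [pvAStep, heq]; omega
          have hB : pvStep kv.2 (some m, pvPosLab pos) kv.1 = (some m, pvPosLab pos) := by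
            simp [pvStep, hlt, heq]
          rw [hA, hB]
          exact ih pos (some m) (by simp [hpos])

-- getManhattan's trailing if over `positions` is pvPosLab
theorem pvFinal (pos : List String) :
    (if pos.length == 1 then PySem.List.pyGetD pos 0 "" else ".") = pvPosLab pos := by
  match pos with
  | [] => rfl
  | [p] => simp [pvPosLab, PySem.List.pyGetD, PySem.List.pyGet?, PySem.List.pyIdx?]
  | p :: q :: t => simp [pvPosLab]

-- getManhattan at cell (y,x) is B's per-cell stream
theorem pvGM (cands : PySem.Dict String (List Int)) (hk : cands.keys.Nodup) (y x : Nat)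
    (g : List (List String)) :
    pvGetManhattan g [(y : Int), (x : Int)] cands = (pvCell cands.items y x).2 := by
  have hitems : (cands.items.foldl
      (fun (ch : PySem.Dict String Int) kv =>
        ch.insert kv.1 (|PySem.List.pyGetD kv.2 1 0 - PySem.List.pyGetD [(y : Int), (x : Int)] 1 0| +
                        |PySem.List.pyGetD kv.2 0 0 - PySem.List.pyGetD [(y : Int), (x : Int)] 0 0|))
      PySem.Dict.empty).items
      = cands.items.map (fun kv => (kv.1, pvDist kv y x)) := by
    rw [PySem.Dict.items_foldl_insert_fresh cands.items (fun kv : String × List Int => kv.1)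
        (fun kv : String × List Int =>
          |PySem.List.pyGetD kv.2 1 0 - PySem.List.pyGetD [(y : Int), (x : Int)] 1 0| +
          |PySem.List.pyGetD kv.2 0 0 - PySem.List.pyGetD [(y : Int), (x : Int)] 0 0|)
        PySem.Dict.empty (fun a _ => PySem.Dict.contains_empty a.1) hk]
    simp only [PySem.Dict.empty, List.nil_append]
    refine List.map_congr_left (fun kv _ => ?_)
    have h1 : PySem.List.pyGetD [(y : Int), (x : Int)] 1 0 = (x : Int) := by
      simp [PySem.List.pyGetD, PySem.List.pyGet?, PySem.List.pyIdx?]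
    have h0 : PySem.List.pyGetD [(y : Int), (x : Int)] 0 0 = (y : Int) := by
      simp [PySem.List.pyGetD, PySem.List.pyGet?, PySem.List.pyIdx?]
    rw [h1, h0, pvDist, Int.add_comm]
  have hmin := pvMinStep (cands.items.map (fun kv => (kv.1, pvDist kv y x))) [] none (by simp)
  have hB : pvCell cands.items y x
      = ((cands.items.map (fun kv => (kv.1, pvDist kv y x))).foldl
          (fun c kv => pvStep kv.2 c kv.1) ((none : Option Int), pvPosLab [])) := by
    rw [List.foldl_map]
    rfl
  simp only [pvGetManhattan, hitems, pvMinimums]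
  rw [hB, hmin.1]
  exact pvFinal _

-- A's row result, before getManhattan is rewritten to the per-cell stream
def pvRow (cands : PySem.Dict String (List Int)) (w y : Nat) (row : List String) : List String :=
  row.mapIdx (fun x c => if x < w then (if c = "." then pvGetManhattan [] [(y : Int), (x : Int)] cands else c) else c)

-- the inner x-loop only rewrites row y
theorem pvInnerA (cands : PySem.Dict String (List Int)) (y : Nat) (xs : List Nat) :
    ∀ (g : List (List String)), y < g.length →
    xs.foldl (pvAInner cands y) g
      = g.set y (xs.foldl (fun r x =>
          if r.getD x "" ≠ "." then r
          else r.set x (pvGetManhattan [] [(y : Int), (x : Int)] cands)) (g.getD y [])) := by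
  induction xs with
  | nil =>
    intro g hy
    exact (pv_set_getD g y [] hy).symm
  | cons x xs ih =>
    intro g hy
    rw [List.foldl_cons, List.foldl_cons]
    by_cases hc : (g.getD y []).getD x "" ≠ "."
    · have hstep : pvAInner cands y g x = g := by
        unfold pvAInner
        exact if_pos hc
      rw [hstep, ih g hy, if_pos hc]
    · have hstep : pvAInner cands y g x
          = g.set y ((g.getD y []).set x (pvGetManhattan [] [(y : Int), (x : Int)] cands)) := by
        unfold pvAInner
        rw [if_neg hc]
        rfl
      rw [hstep, ih _ (by simpa using hy), if_neg hc]
      rw [List.set_set]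
      have hgy : (g.set y ((g.getD y []).set x (pvGetManhattan [] [(y : Int), (x : Int)] cands))).getD y []
          = (g.getD y []).set x (pvGetManhattan [] [(y : Int), (x : Int)] cands) := by
        rw [List.getD_eq_getElem _ _ (by simpa using hy), List.getElem_set, if_pos rfl]
      rw [hgy]

-- A's row loop is a bounded mapIdx
theorem pvRowA (cands : PySem.Dict String (List Int)) (y w : Nat) (row : List String) :
    (List.range w).foldl (fun r x =>
        if r.getD x "" ≠ "." then r
        else r.set x (pvGetManhattan [] [(y : Int), (x : Int)] cands)) row
      = pvRow cands w y row := by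
  have hconv : (fun (r : List String) (x : Nat) =>
      if r.getD x "" ≠ "." then r
      else r.set x (pvGetManhattan [] [(y : Int), (x : Int)] cands))
      = (fun (r : List String) (x : Nat) =>
          r.set x (if r.getD x "" = "." then pvGetManhattan [] [(y : Int), (x : Int)] cands
                   else r.getD x "")) := by
    funext r x
    by_cases hc : r.getD x "" = "."
    · rw [if_neg (not_not_intro hc), if_pos hc]
    · rw [if_pos hc, if_neg hc]
      by_cases hx : x < r.length
      · rw [List.getD_eq_getElem _ _ hx, List.set_getElem_self]
      · rw [pv_set_oob _ _ _ (le_of_not_gt hx)]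
  rw [hconv]
  exact pvL "" (fun x c => if c = "." then pvGetManhattan [] [(y : Int), (x : Int)] cands else c) w row

-- the outer y-loop, unrolled to a bounded mapIdx over the rows
theorem pvOuterA (cands : PySem.Dict String (List Int)) (grid : List (List String)) :
    ∀ n, n ≤ grid.length →
    (List.range n).foldl
        (fun g y => (List.range (g.getD 0 []).length).foldl (pvAInner cands y) g) grid
      = grid.mapIdx (fun y row =>
          if y < n then pvRow cands ((grid.getD 0 []).length) y row else row) := by
  intro n
  induction n with
  | zero =>
    intro _
    apply List.ext_getElem <;> simp
  | succ n ih =>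
    intro hn1
    have hn : n < grid.length := by omega
    rw [List.range_succ, List.foldl_append, List.foldl_cons, List.foldl_nil,
        ih (by omega)]
    set P := grid.mapIdx (fun y row =>
        if y < n then pvRow cands ((grid.getD 0 []).length) y row else row) with hP
    have hPlen : P.length = grid.length := by simp [hP]
    have h0 : 0 < grid.length := by omega
    have hw : (P.getD 0 []).length = (grid.getD 0 []).length := by
      rw [List.getD_eq_getElem _ _ (by omega : 0 < P.length),
          List.getD_eq_getElem _ _ h0]
      simp only [hP, List.getElem_mapIdx]
      by_cases hz : 0 < n <;> simp [hz, pvRow]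
    have hPn : P.getD n [] = grid[n] := by
      rw [List.getD_eq_getElem _ _ (by omega : n < P.length)]
      simp [hP, List.getElem_mapIdx]
    rw [hw, pvInnerA cands n (List.range ((grid.getD 0 []).length)) P (by omega),
        hPn, pvRowA]
    apply List.ext_getElem
    · simp [hP]
    · intro i h1 h2
      have hi : i < grid.length := by simpa [hP] using h2
      rw [List.getElem_set]
      by_cases hni : n = i
      · subst hni
        simp [List.getElem_mapIdx]
      · rw [List.getElem_mapIdx]
        simp only [List.getElem_mapIdx]
        by_cases hin : i < n
        · simp [hin, Nat.lt_succ_of_lt hin, hni]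
        · have h5 : ¬ i < n + 1 := by omega
          simp [hin, h5, hni]

theorem pvA_norm (grid : List (List String)) (input_dict : List (String × List Int)) :
    propagateGrid grid input_dict
      = pvN grid (PySem.Dict.ofList input_dict).items (grid.headD []).length := by
  have hhead : grid.headD [] = grid.getD 0 [] := by cases grid <;> rfl
  show (List.range grid.length).foldl
      (fun g y => (List.range (g.getD 0 []).length).foldl
        (pvAInner (PySem.Dict.ofList input_dict) y) g) grid = _
  rw [pvOuterA (PySem.Dict.ofList input_dict) grid grid.length le_rfl]
  apply List.ext_getElem
  · simp [pvN]
  · intro i h1 h2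
    have hi : i < grid.length := by simpa using h1
    rw [List.getElem_mapIdx]
    simp only [pvN, List.getElem_mapIdx, if_pos hi, pvRow, hhead]
    apply List.ext_getElem
    · simp
    · intro j hj1 hj2
      rw [List.getElem_mapIdx, List.getElem_mapIdx]
      rw [pvGM (PySem.Dict.ofList input_dict) (PySem.Dict.nodup_keys_ofList input_dict) i j []]

-- when no '.' cell lies within the first row's width, the normal form changes nothing
theorem pvN_noDot (grid : List (List String)) (items : List (String × List Int)) (w : Nat)
    (hall : grid.all (fun row => !((row.take w).contains ".")) = true) :
    pvN grid items w = grid := by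
  rw [List.all_eq_true] at hall
  apply List.ext_getElem
  · simp [pvN]
  · intro i h1 h2
    simp only [pvN, List.getElem_mapIdx]
    apply List.ext_getElem
    · simp
    · intro j hj1 hj2
      rw [List.getElem_mapIdx]
      by_cases hjw : j < w
      · rw [if_pos hjw]
        have hmem : grid[i][j] ∈ grid[i].take w := by
          have : (grid[i].take w)[j]'(by simp; omega) = grid[i][j] := List.getElem_take
          rw [← this]
          exact List.getElem_mem _
        have hnin : ¬ ("." ∈ grid[i].take w) := by
          simpa using hall grid[i] (List.getElem_mem h2)
        rw [if_neg (fun hdot : grid[i][j] = "." => hnin (hdot ▸ hmem))]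
      · rw [if_neg hjw]

-- pvBRow writes exactly the pvStep value
theorem pvBRowConv (k : String) (ay cx : Int) :
    pvBRow k ay cx
      = (fun (row : List (Option Int × String)) (x : Nat) =>
          row.set x (pvStep (ay + |cx - (x : Int)|) (row.getD x ((none : Option Int), ".")) k)) := by
  funext row x
  rcases hc : (row[x]?.getD ((none : Option Int), ".")).1 with _ | b
  · simp [pvBRow, pvStep, hc]
  · by_cases hlt : ay + |cx - (x : Int)| < b
    · simp [pvBRow, pvStep, hc, hlt]
    · by_cases heq : ay + |cx - (x : Int)| = b
      · simp [pvBRow, pvStep, hc, heq]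
      · simp only [pvBRow, pvStep, List.getD_eq_getElem?_getD, hc, if_neg hlt, if_neg heq]
        rw [← List.getD_eq_getElem?_getD]
        by_cases hx : x < row.length
        · rw [List.getD_eq_getElem _ _ hx, List.set_getElem_self]
        · rw [pv_set_oob _ _ _ (le_of_not_gt hx)]

-- B's per-candidate row sweep is a bounded mapIdx of pvStep
theorem pvBSweepRow (k : String) (ay cx : Int) (w : Nat) (row : List (Option Int × String)) :
    (List.range w).foldl (pvBRow k ay cx) row
      = row.mapIdx (fun x c => if x < w then pvStep (ay + |cx - (x : Int)|) c k else c) := by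
  rw [pvBRowConv]
  exact pvL ((none : Option Int), ".") (fun x c => pvStep (ay + |cx - (x : Int)|) c k) w row

-- B's state, row y (in range), is a pointwise fold over the candidates
theorem pvBStateRow (items : List (String × List Int)) (h w y : Nat) (hy : y < h) :
    (( items.foldl
        (fun st kv =>
          (List.range h).foldl
            (fun st y => st.set y ((List.range w).foldl
              (pvBRow kv.1 |PySem.List.pyGetD kv.2 0 0 - (y : Int)| (PySem.List.pyGetD kv.2 1 0))
              (st.getD y []))) st)
        (List.replicate h (List.replicate w ((none : Option Int), ".")))).getD y [])
      = (List.replicate w ((none : Option Int), ".")).mapIdx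
          (fun x c => items.foldl
            (fun c kv => if x < w then pvStep (pvDist kv y x) c kv.1 else c) c) := by
  have hstepfun : (fun (st : List (List (Option Int × String))) (kv : String × List Int) =>
      (List.range h).foldl
        (fun st y => st.set y ((List.range w).foldl
          (pvBRow kv.1 |PySem.List.pyGetD kv.2 0 0 - (y : Int)| (PySem.List.pyGetD kv.2 1 0))
          (st.getD y []))) st)
      = (fun st kv => st.mapIdx (fun y row =>
          if y < h then row.mapIdx (fun x c => if x < w then pvStep (pvDist kv y x) c kv.1 else c)
          else row)) := by
    funext st kv
    rw [pvL ([] : List (Option Int × String))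
        (fun y row => (List.range w).foldl
          (pvBRow kv.1 |PySem.List.pyGetD kv.2 0 0 - (y : Int)| (PySem.List.pyGetD kv.2 1 0)) row) h st]
    congr 1
    funext y row
    rw [pvBSweepRow]
    rfl
  rw [hstepfun, pvFoldlMapIdx]
  rw [List.getD_eq_getElem _ _ (by simpa using hy), List.getElem_mapIdx, List.getElem_replicate]
  have hinner : (fun (row : List (Option Int × String)) (kv : String × List Int) =>
      if y < h then row.mapIdx (fun x c => if x < w then pvStep (pvDist kv y x) c kv.1 else c)
      else row)
      = (fun row kv => row.mapIdx (fun x c => if x < w then pvStep (pvDist kv y x) c kv.1 else c)) := by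
    funext row kv
    rw [if_pos hy]
  rw [hinner, pvFoldlMapIdx]

-- B's state, read at an in-range cell, is the per-cell stream
theorem pvBState (items : List (String × List Int)) (h w y x : Nat) (hy : y < h) (hx : x < w) :
    ((( items.foldl
        (fun st kv =>
          (List.range h).foldl
            (fun st y => st.set y ((List.range w).foldl
              (pvBRow kv.1 |PySem.List.pyGetD kv.2 0 0 - (y : Int)| (PySem.List.pyGetD kv.2 1 0))
              (st.getD y []))) st)
        (List.replicate h (List.replicate w ((none : Option Int), ".")))).getD y []).getD x
        ((none : Option Int), "."))
      = pvCell items y x := by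
  rw [pvBStateRow items h w y hy]
  rw [List.getD_eq_getElem _ _ (by simpa using hx), List.getElem_mapIdx, List.getElem_replicate]
  have hfin : (fun (c : Option Int × String) (kv : String × List Int) =>
      if x < w then pvStep (pvDist kv y x) c kv.1 else c)
      = (fun c kv => pvStep (pvDist kv y x) c kv.1) := by
    funext c kv
    rw [if_pos hx]
  rw [hfin]
  rfl

-- B's port equals the normal form
theorem pvB_norm (grid : List (List String)) (input_dict : List (String × List Int)) :
    propagateGrid_alt grid input_dict
      = pvN grid (PySem.Dict.ofList input_dict).items (grid.headD []).length := by
  by_cases hcond : grid.all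
      (fun row => !((row.take (grid.headD []).length).contains ".")) = true
  · simp only [propagateGrid_alt, if_pos hcond]
    exact (pvN_noDot grid _ _ hcond).symm
  · simp only [propagateGrid_alt, if_neg hcond]
    apply List.ext_getElem
    · simp [pvN]
    · intro i h1 h2
      simp only [pvN, List.getElem_mapIdx]
      apply List.ext_getElem
      · simp
      · intro j hj1 hj2
        rw [List.getElem_mapIdx, List.getElem_mapIdx]
        have hi : i < grid.length := by simpa using h1
        have hj : j < grid[i].length := by simpa using hj1
        by_cases hjw : j < (grid.headD []).length
        · rw [if_pos hjw]
          by_cases hdot : grid[i][j] = "."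
          · rw [if_pos ⟨hdot, hjw⟩, if_pos hdot]
            rw [pvBState (PySem.Dict.ofList input_dict).items grid.length
                ((grid.headD []).length) i j hi hjw]
          · rw [if_neg (fun hpair => hdot hpair.1), if_neg hdot]
        · rw [if_neg hjw, if_neg (fun hpair => hjw hpair.2)]

-- ===== VERDICT (by name: the statement is the Claim_ definition above) =====
theorem propagateGrid_spec : Claim_equal_propagateGrid := by
  intro grid input_dict _ _
  unfold Spec_propagateGrid
  rw [pvA_norm, pvB_norm]
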